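-- pv_equiv track=rewrite | github.com/M1chol/maturaInformatyka | Operon/Liczby-palindromiczne/1.4.py | do_systemow
-- ===== SOURCE A (Python) =====
-- def do_systemow(liczba: int) -> list:
--     dg='0123456789ABCDEF'
--     wynik=[]
--     for system in range(2,17):
--         liczba_copy=liczba
--         ret_liczba=''
--         while liczba_copy>0:
--             ret_liczba+=dg[liczba_copy%system]
--             liczba_copy//=system
--         wynik.append(''.join(list(reversed(ret_liczba))))
--     return wynik
-- ===== SOURCE B (Python) =====
-- def do_systemow(liczba: int) -> list:
--     dg = '0123456789ABCDEF'
--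
--     def repr_in(n, base):
--         # digits most-significant-first, by descending powers of the base
--         if n <= 0:
--             return ''
--         p = 1
--         while p * base <= n:
--             p *= base
--         s = ''
--         while p >= 1:
--             s += dg[n // p]
--             n %= p
--             p //= base
--         return s
--
--     return [repr_in(liczba, base) for base in range(2, 17)]
-- ===== Notes on version B (the rewrite author's own statement) =====
-- stated objective: alternative
-- what changed: Replaces A's least-significant-first repeated-division loop followed by a reverse with a power-of-base algorithm: it first finds the largest power of the base not exceeding n, then extracts digits most-significant-first by dividing by descending powers, so no reversal is needed.
import Mathlib
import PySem

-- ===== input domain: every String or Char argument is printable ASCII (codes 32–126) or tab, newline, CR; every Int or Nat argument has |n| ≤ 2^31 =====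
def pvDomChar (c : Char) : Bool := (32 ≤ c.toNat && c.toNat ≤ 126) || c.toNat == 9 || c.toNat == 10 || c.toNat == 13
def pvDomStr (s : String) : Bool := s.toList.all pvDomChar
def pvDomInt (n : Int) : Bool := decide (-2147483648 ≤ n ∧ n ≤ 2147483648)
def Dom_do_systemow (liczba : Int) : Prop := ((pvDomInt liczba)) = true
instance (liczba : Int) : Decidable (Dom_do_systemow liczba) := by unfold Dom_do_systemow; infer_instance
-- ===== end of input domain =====

-- B replaces A's least-significant-first division loop + reverse with a power-of-base
-- algorithm extracting digits most-significant-first; objective: alternative (no reverse).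

-- ===== PORT A =====
-- dg = '0123456789ABCDEF'
def pvDgA : List Char := ("0123456789ABCDEF" : String).toList

-- the while loop: collects dg[liczba_copy % system] in iteration order (fuel only
-- totalizes; liczba.toNat + 1 always suffices since the quotient strictly decreases)
def pvLoopA : Nat → Int → Int → List Char
  | 0, _, _ => []
  | f + 1, n, system =>
    if n > 0 then
      (PySem.List.pyGet? pvDgA (PySem.Int.mod n system)).getD ' '
        :: pvLoopA f (PySem.Int.floordiv n system) system
    else []

def do_systemow (liczba : Int) : List String :=
  (PySem.List.pyRange 2 17 1).foldl
    (fun wynik system =>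
      wynik ++ [String.mk (pvLoopA (liczba.toNat + 1) liczba system).reverse]) []

-- ===== PORT B =====
def pvDgB : List Char := ("0123456789ABCDEF" : String).toList

-- while p * base <= n: p *= base   (fuel only totalizes; p grows geometrically)
def pvPowB : Nat → Int → Int → Int → Int
  | 0, p, _, _ => p
  | f + 1, p, base, n => if p * base ≤ n then pvPowB f (p * base) base n else p

-- while p >= 1: s += dg[n // p]; n %= p; p //= base   (fuel only totalizes)
def pvDigB : Nat → Int → Int → Int → List Char
  | 0, _, _, _ => []
  | f + 1, n, p, base =>
    if 1 ≤ p then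
      (PySem.List.pyGet? pvDgB (PySem.Int.floordiv n p)).getD ' '
        :: pvDigB f (PySem.Int.mod n p) (PySem.Int.floordiv p base) base
    else []

-- def repr_in(n, base): most-significant-first digits via descending powers of base
def pvReprIn (n base : Int) : String :=
  if n ≤ 0 then ""
  else String.mk (pvDigB (n.toNat + 1) n (pvPowB (n.toNat + 1) 1 base n) base)

def do_systemow_alt (liczba : Int) : List String :=
  (PySem.List.pyRange 2 17 1).map (fun base => pvReprIn liczba base)

-- ===== PRECONDITION & SPEC =====
def Spec_do_systemow (liczba : Int) (out : List String) : Prop := out = do_systemow_alt liczba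
instance (liczba : Int) (out : List String) : Decidable (Spec_do_systemow liczba out) := by unfold Spec_do_systemow; infer_instance

-- ===== CLAIM (what is proved, stated in full; the proofs are below) =====
def Claim_equal_do_systemow : Prop := ∀ (liczba : Int), Dom_do_systemow liczba → Spec_do_systemow liczba (do_systemow liczba)

-- ===== LEMMAS AND PROOFS =====

-- digit character (proof-side abbreviation for both ports' dg lookups)
def pvDigitChar (d : Nat) : Char := pvDgA.getD d ' '

-- canonical least-significant-first digit list of m in base b
def pvDA (b m : Nat) : List Nat :=
  if h : m = 0 ∨ b < 2 then [] else (m % b) :: pvDA b (m / b)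
termination_by m
decreasing_by
  exact Nat.div_lt_self (Nat.pos_of_ne_zero (by omega)) (by omega)

-- fixed-width least-significant-first digits (trailing zeros allowed)
def pvW (b : Nat) : Nat → Nat → List Nat
  | _, 0 => []
  | m, k + 1 => (m % b) :: pvW b (m / b) k

theorem pvW_low (b : Nat) : ∀ (k m : Nat), pvW b (m % b ^ k) k = pvW b m k := by
  intro k
  induction k with
  | zero => intro m; rfl
  | succ k ih =>
    intro m
    show (m % b ^ (k + 1) % b) :: pvW b (m % b ^ (k + 1) / b) k
        = (m % b) :: pvW b (m / b) k
    have h1 : m % b ^ (k + 1) % b = m % b :=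
      Nat.mod_mod_of_dvd m (dvd_pow_self b (Nat.succ_ne_zero k))
    have h2 : m % b ^ (k + 1) / b = m / b % b ^ k := by
      rw [pow_succ, mul_comm]
      exact Nat.mod_mul_right_div_self m b (b ^ k)
    rw [h1, h2, ih]

theorem pvW_rev_top (b : Nat) (hb : 0 < b) : ∀ (k m : Nat), m < b ^ (k + 1) →
    (pvW b m (k + 1)).reverse = (m / b ^ k) :: (pvW b m k).reverse := by
  intro k
  induction k with
  | zero =>
    intro m hm
    have hm' : m < b := by simpa using hm
    show ((m % b) :: pvW b (m / b) 0).reverse = m / b ^ 0 :: (pvW b m 0).reverse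
    simp [pvW, Nat.mod_eq_of_lt hm']
  | succ k ih =>
    intro m hm
    have hmb : m / b < b ^ (k + 1) := by
      rw [Nat.div_lt_iff_lt_mul hb]
      calc m < b ^ (k + 2) := hm
        _ = b ^ (k + 1) * b := by ring
    have e1 : pvW b m (k + 2) = (m % b) :: pvW b (m / b) (k + 1) := rfl
    have e2 : pvW b m (k + 1) = (m % b) :: pvW b (m / b) k := rfl
    rw [e1, e2, List.reverse_cons, List.reverse_cons, ih (m / b) hmb]
    have : m / b / b ^ k = m / b ^ (k + 1) := by
      rw [Nat.div_div_eq_div_mul, pow_succ, mul_comm]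
    rw [this]
    rfl

theorem pvDA_zero (b : Nat) : pvDA b 0 = [] := by
  rw [pvDA]; simp

theorem pvDA_pos (b m : Nat) (hb : 2 ≤ b) (hm : 0 < m) :
    pvDA b m = (m % b) :: pvDA b (m / b) := by
  rw [pvDA]
  rw [dif_neg (by omega : ¬ (m = 0 ∨ b < 2))]

theorem pvW_eq_pvDA (b : Nat) (hb : 2 ≤ b) : ∀ (j m : Nat),
    (pvDA b m).length ≤ j →
    pvW b m j = pvDA b m ++ List.replicate (j - (pvDA b m).length) 0 := by
  intro j
  induction j with
  | zero =>
    intro m h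
    have : pvDA b m = [] := List.eq_nil_of_length_eq_zero (by omega)
    simp [pvW, this]
  | succ j ih =>
    intro m h
    by_cases hm : m = 0
    · subst hm
      rw [pvDA_zero] at *
      show (0 % b) :: pvW b (0 / b) j = [] ++ List.replicate (j + 1 - 0) 0
      rw [Nat.zero_mod, Nat.zero_div, ih 0 (by simp [pvDA_zero]), pvDA_zero]
      simp [List.replicate_succ]
    · have hm' : 0 < m := Nat.pos_of_ne_zero hm
      rw [pvDA_pos b m hb hm'] at *
      show (m % b) :: pvW b (m / b) j = _
      rw [ih (m / b) (by simpa using h)]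
      simp [List.replicate, List.cons_append]

theorem pvDA_len_le (b : Nat) (hb : 2 ≤ b) : ∀ (j m : Nat), m < b ^ j →
    (pvDA b m).length ≤ j := by
  intro j
  induction j with
  | zero =>
    intro m h
    have hm0 : m = 0 := by simpa using h
    simp [hm0, pvDA_zero]
  | succ j ih =>
    intro m h
    by_cases hm : m = 0
    · simp [hm, pvDA_zero]
    · rw [pvDA_pos b m hb (Nat.pos_of_ne_zero hm)]
      have : m / b < b ^ j := by
        rw [Nat.div_lt_iff_lt_mul (by omega)]
        calc m < b ^ (j + 1) := h
          _ = b ^ j * b := by ring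
      simpa using ih (m / b) this

theorem pvDA_len_ge (b : Nat) (hb : 2 ≤ b) : ∀ (k m : Nat), b ^ k ≤ m →
    k + 1 ≤ (pvDA b m).length := by
  intro k
  induction k with
  | zero =>
    intro m h
    have hm : 0 < m := by simpa using h
    rw [pvDA_pos b m hb hm]
    simp
  | succ k ih =>
    intro m h
    have hm : 0 < m := lt_of_lt_of_le (pow_pos (by omega : 0 < b) _) h
    rw [pvDA_pos b m hb hm]
    have : b ^ k ≤ m / b := by
      rw [Nat.le_div_iff_mul_le (by omega)]
      calc b ^ k * b = b ^ (k + 1) := (pow_succ b k).symm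
        _ ≤ m := h
    simpa using ih (m / b) this

-- A's loop computes the LSB-first digit characters
theorem pvLoopA_eq (b : Nat) (hb : 2 ≤ b) : ∀ (f m : Nat), m < f →
    pvLoopA f (m : Int) (b : Int) = (pvDA b m).map pvDigitChar := by
  intro f
  induction f with
  | zero => omega
  | succ f ih =>
    intro m hm
    by_cases h0 : m = 0
    · subst h0
      simp [pvLoopA, pvDA_zero]
    · have hpos : (0 : Int) < (m : Int) := by exact_mod_cast Nat.pos_of_ne_zero h0
      have hdiv : m / b < f := by
        have := Nat.div_lt_self (Nat.pos_of_ne_zero h0) (show 1 < b by omega)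
        omega
      rw [pvDA_pos b m hb (Nat.pos_of_ne_zero h0)]
      rw [pvLoopA, if_pos hpos]
      simp only [PySem.Int.mod_natCast, PySem.Int.floordiv_natCast]
      rw [ih (m / b) hdiv, List.map_cons]
      congr 1
      rw [PySem.List.pyGet?_natCast]
      simp [pvDigitChar, List.getD_eq_getElem?_getD]

-- B's power loop finds the largest power of the base not exceeding n
theorem pvPowB_eq (b n : Nat) (hb : 2 ≤ b) : ∀ (f p : Nat), p ≤ n → n < p * b ^ f →
    ∃ j, pvPowB f (p : Int) (b : Int) (n : Int) = ((p * b ^ j : Nat) : Int) ∧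
      p * b ^ j ≤ n ∧ n < p * b ^ j * b := by
  intro f
  induction f with
  | zero => intro p h1 h2; simp at h2; omega
  | succ f ih =>
    intro p h1 h2
    by_cases hc : p * b ≤ n
    · have hcast : ((p : Int) * (b : Int) ≤ (n : Int)) := by exact_mod_cast hc
      have hrec : n < p * b * b ^ f := by
        calc n < p * b ^ (f + 1) := h2
          _ = p * b * b ^ f := by ring
      obtain ⟨j, hj, hle, hlt⟩ := ih (p * b) hc hrec
      refine ⟨j + 1, ?_, ?_, ?_⟩
      · show pvPowB (f + 1) (p : Int) (b : Int) (n : Int) = _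
        simp only [pvPowB, hcast, if_pos]
        rw [show ((p : Int) * (b : Int)) = ((p * b : Nat) : Int) by push_cast; ring, hj]
        congr 1
        ring
      · calc p * b ^ (j + 1) = p * b * b ^ j := by ring
          _ ≤ n := hle
      · calc n < p * b * b ^ j * b := hlt
          _ = p * b ^ (j + 1) * b := by ring
    · have hcast : ¬ ((p : Int) * (b : Int) ≤ (n : Int)) := by exact_mod_cast hc
      refine ⟨0, ?_, by simpa using h1, by simp; omega⟩
      show pvPowB (f + 1) (p : Int) (b : Int) (n : Int) = _
      simp [pvPowB, hcast]

-- B's digit loop extracts the fixed-width digits MSB-first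
theorem pvDigB_eq (b : Nat) (hb : 2 ≤ b) : ∀ (k f m : Nat), m < b ^ (k + 1) → k + 2 ≤ f →
    pvDigB f (m : Int) ((b ^ k : Nat) : Int) (b : Int)
      = ((pvW b m (k + 1)).reverse).map pvDigitChar := by
  intro k
  induction k with
  | zero =>
    intro f m hm hf
    obtain ⟨f1, rfl⟩ : ∃ f1, f = f1 + 1 := ⟨f - 1, by omega⟩
    obtain ⟨f2, rfl⟩ : ∃ f2, f1 = f2 + 1 := ⟨f1 - 1, by omega⟩
    simp only [pow_zero, Nat.cast_one]
    rw [pvDigB, if_pos (le_refl (1 : Int))]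
    have h1 : PySem.Int.floordiv (m : Int) 1 = (m : Int) := by
      rw [show (1 : Int) = ((1 : Nat) : Int) by norm_num, PySem.Int.floordiv_natCast]
      simp
    have h2 : PySem.Int.mod (m : Int) 1 = (0 : Int) := by
      rw [show (1 : Int) = ((1 : Nat) : Int) by norm_num, PySem.Int.mod_natCast]
      simp
    have h3 : PySem.Int.floordiv (1 : Int) (b : Int) = (0 : Int) := by
      rw [show (1 : Int) = ((1 : Nat) : Int) by norm_num, PySem.Int.floordiv_natCast]
      rw [Nat.div_eq_of_lt (by omega)]
      simp
    rw [h1, h2, h3]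
    rw [pvDigB, if_neg (by norm_num)]
    show _ = (((m % b) :: pvW b (m / b) 0).reverse).map pvDigitChar
    have hmb : m % b = m := Nat.mod_eq_of_lt (by simpa using hm)
    rw [PySem.List.pyGet?_natCast]
    simp [pvW, hmb, pvDigitChar, pvDgB, pvDgA, List.getD_eq_getElem?_getD]
  | succ k ih =>
    intro f m hm hf
    obtain ⟨f1, rfl⟩ : ∃ f1, f = f1 + 1 := ⟨f - 1, by omega⟩
    have hp1 : (1 : Int) ≤ ((b ^ (k + 1) : Nat) : Int) := by
      exact_mod_cast Nat.one_le_iff_ne_zero.mpr (pow_ne_zero _ (by omega : b ≠ 0))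
    rw [pvDigB, if_pos hp1]
    simp only [PySem.Int.mod_natCast, PySem.Int.floordiv_natCast]
    have hq : b ^ (k + 1) / b = b ^ k := by
      rw [pow_succ]
      exact Nat.mul_div_cancel _ (by omega)
    rw [hq]
    rw [ih f1 (m % b ^ (k + 1)) (Nat.mod_lt m (pow_pos (by omega : 0 < b) _)) (by omega)]
    rw [pvW_rev_top b (by omega) (k + 1) m hm, ← pvW_low b (k + 1) m]
    rw [PySem.List.pyGet?_natCast]
    simp [pvDigitChar, pvDgB, pvDgA, List.getD_eq_getElem?_getD]

-- per-base agreement of the two ports' inner computations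
theorem pvPerBase (n b : Int) (hb2 : 2 ≤ b) :
    String.mk (pvLoopA (n.toNat + 1) n b).reverse = pvReprIn n b := by
  by_cases hn : n ≤ 0
  · have h0 : ¬ (0 : Int) < n := by omega
    obtain ⟨m, hm⟩ : ∃ m : Nat, n.toNat + 1 = m + 1 := ⟨n.toNat, rfl⟩
    rw [pvReprIn, if_pos hn, hm]
    simp [pvLoopA, h0]
    rfl
  · push_neg at hn
    set m := n.toNat with hmdef
    have hn' : n = (m : Int) := (Int.toNat_of_nonneg (by omega)).symm
    set bn := b.toNat with hbndef
    have hb' : b = (bn : Int) := (Int.toNat_of_nonneg (by omega)).symm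
    have hbn : 2 ≤ bn := by omega
    have hm1 : 1 ≤ m := by omega
    rw [pvReprIn, if_neg (by omega)]
    rw [hn', hb']
    -- A side
    rw [pvLoopA_eq bn hbn (m + 1) m (by omega)]
    -- B side: the power loop
    have hpow : m < 1 * bn ^ (m + 1) := by
      have h1 : m < 2 ^ (m + 1) := by
        calc m < 2 ^ m := Nat.lt_two_pow_self
          _ ≤ 2 ^ (m + 1) := Nat.pow_le_pow_right (by omega) (by omega)
      have h2 : 2 ^ (m + 1) ≤ bn ^ (m + 1) := Nat.pow_le_pow_left hbn _
      calc m < 2 ^ (m + 1) := h1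
        _ ≤ bn ^ (m + 1) := h2
        _ = 1 * bn ^ (m + 1) := (one_mul _).symm
    obtain ⟨j, hj, hle, hlt⟩ := pvPowB_eq bn m hbn (m + 1) 1 hm1 hpow
    rw [show ((1 : Nat) : Int) = (1 : Int) by norm_num] at hj
    simp only [one_mul] at hj hle hlt
    simp only [Int.toNat_natCast]
    rw [hj]
    -- the digit loop
    have hjm : j + 2 ≤ m + 1 := by
      have : j < 2 ^ j := Nat.lt_two_pow_self
      have : 2 ^ j ≤ bn ^ j := Nat.pow_le_pow_left hbn _
      omega
    rw [pvDigB_eq bn hbn j (m + 1) m (by calc m < bn ^ j * bn := hlt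
          _ = bn ^ (j + 1) := (pow_succ bn j).symm) hjm]
    -- identify the fixed-width digits with the canonical digits
    have hlen : (pvDA bn m).length = j + 1 := by
      have h1 := pvDA_len_le bn hbn (j + 1) m (by calc m < bn ^ j * bn := hlt
          _ = bn ^ (j + 1) := (pow_succ bn j).symm)
      have h2 := pvDA_len_ge bn hbn j m hle
      omega
    rw [pvW_eq_pvDA bn hbn (j + 1) m (by omega), hlen]
    simp [List.map_reverse]

theorem do_systemow_spec_aux (liczba : Int) :
    do_systemow liczba = do_systemow_alt liczba := by
  unfold do_systemow do_systemow_alt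
  rw [PySem.List.foldl_append_singleton_eq_map]
  simp only [List.nil_append]
  apply List.map_congr_left
  intro b hbmem
  rcases PySem.List.mem_pyRange_one.mp hbmem with ⟨hb1, hb2⟩
  exact pvPerBase liczba b hb1

-- ===== VERDICT (by name: the statement is the Claim_ definition above) =====
theorem do_systemow_spec : Claim_equal_do_systemow := by
  intro liczba _
  unfold Spec_do_systemow
  exact do_systemow_spec_aux liczba
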